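-- pv_equiv track=rewrite | github.com/anthonygedeon/adventofcode | 2015/05/main.py | part_2
-- ===== SOURCE A (Python) =====
-- from typing import List
--
-- def part_2(words: List[str]) -> int:
--     nice_words: int = 0
--     for word in words:
--         is_pair = False
--         is_twice = False
--
--         for i in range(len(word)):
--             pair = word[i:i+2]
--             if pair in word[i+2:]:
--                 is_pair = True
--                 break
--
--         for i in range(len(word)):
--             if len(word[i:i+3]) >= 3:
--                 a, _, c = word[i:i+3]
--                 if a == c:
--                     is_twice = True
--                     break
--
--         if is_pair and is_twice:
--             nice_words += 1
--
--     return nice_words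
-- ===== SOURCE B (Python) =====
-- from typing import List
--
-- def part_2(words: List[str]) -> int:
--     nice_words = 0
--     for word in words:
--         n = len(word)
--         seen = set()
--         pair_ok = False
--         xyx_ok = False
--         for j in range(n - 1):
--             if j >= 2:
--                 seen.add(word[j-2:j])
--             if word[j:j+2] in seen:
--                 pair_ok = True
--             if j + 2 < n and word[j] == word[j+2]:
--                 xyx_ok = True
--         if pair_ok and xyx_ok:
--             nice_words += 1
--     return nice_words
-- ===== Notes on version B (the rewrite author's own statement) =====
-- stated objective: alternative
-- what changed: Replaces A's per-index substring search (pair in word[i+2:]) plus a second slice-unpacking scan by a single left-to-right pass per word that keeps a hash set of the pairs seen two positions back and checks the xyx condition in the same pass (O(n) per word vs A's quadratic worst case; a timing run did not consistently confirm a 1.5x win, so no speed is claimed).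
import Mathlib
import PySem

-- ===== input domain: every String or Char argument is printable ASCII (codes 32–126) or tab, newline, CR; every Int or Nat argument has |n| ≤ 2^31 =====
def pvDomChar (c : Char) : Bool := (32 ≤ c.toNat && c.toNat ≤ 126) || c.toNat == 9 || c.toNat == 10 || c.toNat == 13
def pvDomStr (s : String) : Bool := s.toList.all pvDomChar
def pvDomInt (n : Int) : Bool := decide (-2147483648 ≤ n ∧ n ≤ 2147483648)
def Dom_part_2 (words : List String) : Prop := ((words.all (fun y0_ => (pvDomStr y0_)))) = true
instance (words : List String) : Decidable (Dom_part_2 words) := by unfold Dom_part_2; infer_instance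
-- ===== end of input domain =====

-- B replaces A's per-index substring search by a single pass per word keeping a set of
-- the pairs seen two positions back (objective: alternative single-pass algorithm).

-- ===== PORT A =====
-- first inner loop of A: 'pair = word[i:i+2]; if pair in word[i+2:]: break' (break ⇒ any)
def pairLoopA (w : List Char) : Bool :=
  (List.range w.length).any fun i =>
    PySem.Chars.isIn (PySem.List.slice w (some (i : Int)) (some ((i : Int) + 2)))
                     (PySem.List.slice w (some ((i : Int) + 2)) none)

-- second inner loop of A: 'if len(word[i:i+3]) >= 3: a,_,c = word[i:i+3]; if a == c: break'
def twiceLoopA (w : List Char) : Bool :=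
  (List.range w.length).any fun i =>
    match PySem.List.slice w (some (i : Int)) (some ((i : Int) + 3)) with
    | [a, _, c] => a == c
    | _ => false

def part_2 (words : List String) : Int :=
  words.foldl (fun acc word =>
    if pairLoopA word.toList && twiceLoopA word.toList then acc + 1 else acc) 0

-- ===== PORT B =====
-- one iteration of B's single pass: add the pair two positions back, then test membership
def stepB (w : List Char) (st : PySem.Set (List Char) × Bool × Bool) (j : Nat) :
    PySem.Set (List Char) × Bool × Bool :=
  let seen := if 2 ≤ j then
      PySem.Set.add st.1 (PySem.List.slice w (some ((j : Int) - 2)) (some (j : Int)))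
    else st.1
  let pok := if PySem.Set.contains seen
      (PySem.List.slice w (some (j : Int)) (some ((j : Int) + 2))) then true else st.2.1
  let xok := if j + 2 < w.length && (w[j]? == w[j+2]?) then true else st.2.2
  (seen, pok, xok)

def niceB (w : List Char) : Bool :=
  let st := (List.range (w.length - 1)).foldl (stepB w) (PySem.Set.empty, false, false)
  st.2.1 && st.2.2

def part_2_alt (words : List String) : Int :=
  words.foldl (fun acc word => if niceB word.toList then acc + 1 else acc) 0

-- ===== PRECONDITION & SPEC =====
def Spec_part_2 (words : List String) (out : Int) : Prop := out = part_2_alt words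
instance (words : List String) (out : Int) : Decidable (Spec_part_2 words out) := by unfold Spec_part_2; infer_instance

-- ===== CLAIM (what is proved, stated in full; the proofs are below) =====
def Claim_equal_part_2 : Prop := ∀ (words : List String), Dom_part_2 words → Spec_part_2 words (part_2 words)

-- ===== LEMMAS AND PROOFS =====

-- 'word has a pair of adjacent characters appearing twice without overlap'
def PairProp (w : List Char) : Prop :=
  ∃ i j : Nat, i + 2 ≤ j ∧ j + 1 < w.length ∧ (w.drop i).take 2 = (w.drop j).take 2

-- 'word has a letter repeating with exactly one letter between'
def XProp (w : List Char) : Prop :=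
  ∃ j : Nat, j + 2 < w.length ∧ w[j]? = w[j+2]?

lemma slice2_eq (w : List Char) (i : Nat) :
    PySem.List.slice w (some (i : Int)) (some ((i : Int) + 2)) = (w.drop i).take 2 := by
  have h : ((i : Int) + 2) = ((i + 2 : Nat) : Int) := by push_cast; ring
  rw [h, PySem.List.slice_natCast]
  congr 1
  omega

lemma slice3_eq (w : List Char) (i : Nat) :
    PySem.List.slice w (some (i : Int)) (some ((i : Int) + 3)) = (w.drop i).take 3 := by
  have h : ((i : Int) + 3) = ((i + 3 : Nat) : Int) := by push_cast; ring
  rw [h, PySem.List.slice_natCast]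
  congr 1
  omega

lemma sliceFrom_eq (w : List Char) (i : Nat) :
    PySem.List.slice w (some ((i : Int) + 2)) none = w.drop (i + 2) := by
  have h : ((i : Int) + 2) = ((i + 2 : Nat) : Int) := by push_cast; ring
  rw [h, PySem.List.slice_from_natCast]

lemma sliceBack_eq (w : List Char) (j : Nat) (hj : 2 ≤ j) :
    PySem.List.slice w (some ((j : Int) - 2)) (some (j : Int)) = (w.drop (j - 2)).take 2 := by
  have h : ((j : Int) - 2) = ((j - 2 : Nat) : Int) := by omega
  rw [h, PySem.List.slice_natCast]
  congr 1
  omega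

lemma take2_eq (w : List Char) (i : Nat) (h : i + 1 < w.length) :
    (w.drop i).take 2 = [w[i], w[i+1]] := by
  rw [List.drop_eq_getElem_cons (by omega), List.drop_eq_getElem_cons h]
  rfl

lemma take3_eq (w : List Char) (i : Nat) (h : i + 2 < w.length) :
    (w.drop i).take 3 = [w[i], w[i+1], w[i+2]] := by
  rw [List.drop_eq_getElem_cons (by omega), List.drop_eq_getElem_cons (by omega),
      List.drop_eq_getElem_cons h]
  rfl

lemma prefix2_iff (a b : Char) (l : List Char) :
    ([a, b] <+: l) ↔ l[0]? = some a ∧ l[1]? = some b := by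
  match l with
  | [] => simp
  | [x] => simp [List.cons_prefix_cons]
  | x :: y :: t =>
      simp [List.cons_prefix_cons]
      constructor
      · rintro ⟨h1, h2⟩; exact ⟨h1.symm, h2.symm⟩
      · rintro ⟨h1, h2⟩; exact ⟨h1.symm, h2.symm⟩

lemma pairLoopA_iff (w : List Char) : pairLoopA w = true ↔ PairProp w := by
  unfold pairLoopA
  rw [List.any_eq_true]
  simp only [List.mem_range, slice2_eq, sliceFrom_eq]
  constructor
  · rintro ⟨i, hi, hin⟩
    rw [← PySem.Chars.exists_prefix_drop_iff_isIn] at hin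
    obtain ⟨k, hk⟩ := hin
    have hdd : (w.drop (i + 2)).drop k = w.drop (i + 2 + k) := by
      rw [List.drop_drop]
    rw [hdd] at hk
    by_cases h1 : i + 1 < w.length
    · rw [take2_eq w i h1, prefix2_iff] at hk
      obtain ⟨h0, h2⟩ := hk
      rw [List.getElem?_drop] at h0 h2
      obtain ⟨hm0, e0⟩ := List.getElem?_eq_some_iff.mp h0
      obtain ⟨hm1, e2⟩ := List.getElem?_eq_some_iff.mp h2
      refine ⟨i, i + 2 + k, by omega, by omega, ?_⟩
      rw [take2_eq w i h1, take2_eq w (i + 2 + k) (by omega)]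
      have e0' : w[i + 2 + k]'(by omega) = w[i] := by simpa using e0
      have e2' : w[i + 2 + k + 1]'(by omega) = w[i + 1] := by simpa using e2
      simp [e0', e2']
    · -- i is the last index: word[i:i+2] is one character, word[i+2:] is empty
      have hnil : w.drop (i + 2 + k) = [] := List.drop_eq_nil_of_le (by omega)
      rw [hnil] at hk
      have hlen2 : ((w.drop i).take 2).length = 0 := by rw [List.prefix_nil.mp hk]; rfl
      simp only [List.length_take, List.length_drop] at hlen2
      omega
  · rintro ⟨i, j, hij, hj, heq⟩
    refine ⟨i, by omega, ?_⟩
    rw [← PySem.Chars.exists_prefix_drop_iff_isIn]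
    refine ⟨j - (i + 2), ?_⟩
    have hdd : (w.drop (i + 2)).drop (j - (i + 2)) = w.drop j := by
      rw [List.drop_drop]; congr 1; omega
    rw [hdd, heq]
    exact List.take_prefix _ _

lemma twiceLoopA_iff (w : List Char) : twiceLoopA w = true ↔ XProp w := by
  unfold twiceLoopA
  rw [List.any_eq_true]
  simp only [List.mem_range, slice3_eq]
  constructor
  · rintro ⟨i, hi, h⟩
    by_cases h2 : i + 2 < w.length
    · rw [take3_eq w i h2] at h
      simp only [beq_iff_eq] at h
      refine ⟨i, h2, ?_⟩
      rw [List.getElem?_eq_getElem (by omega), List.getElem?_eq_getElem h2, h]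
    · have hlen : ((w.drop i).take 3).length ≤ 2 := by
        simp only [List.length_take, List.length_drop]; omega
      rcases e : (w.drop i).take 3 with _ | ⟨a, _ | ⟨b, _ | ⟨c, t⟩⟩⟩ <;> rw [e] at h <;>
        simp_all
  · rintro ⟨j, hj, h⟩
    refine ⟨j, by omega, ?_⟩
    rw [take3_eq w j hj]
    rw [List.getElem?_eq_getElem (by omega), List.getElem?_eq_getElem hj] at h
    simp only [Option.some.injEq] at h
    simp [h]

lemma foldB_inv (w : List Char) (m : Nat) :
    (∀ p, p ∈ ((List.range m).foldl (stepB w) (PySem.Set.empty, false, false)).1 ↔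
        ∃ i, i + 3 ≤ m ∧ p = (w.drop i).take 2) ∧
    (((List.range m).foldl (stepB w) (PySem.Set.empty, false, false)).2.1 = true ↔
        ∃ i j, i + 2 ≤ j ∧ j < m ∧ (w.drop i).take 2 = (w.drop j).take 2) ∧
    (((List.range m).foldl (stepB w) (PySem.Set.empty, false, false)).2.2 = true ↔
        ∃ j, j < m ∧ j + 2 < w.length ∧ w[j]? = w[j+2]?) := by
  induction m with
  | zero =>
      refine ⟨fun p => ?_, ?_, ?_⟩ <;> simp [PySem.Set.empty]
  | succ m ih =>
      obtain ⟨ih1, ih2, ih3⟩ := ih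
      rw [List.range_succ, List.foldl_append] at *
      set st := (List.range m).foldl (stepB w) (PySem.Set.empty, false, false) with hst
      simp only [List.foldl_cons, List.foldl_nil]
      have hseen : ∀ p, p ∈ (stepB w st m).1 ↔ ∃ i, i + 3 ≤ m + 1 ∧ p = (w.drop i).take 2 := by
        intro p
        by_cases hm : 2 ≤ m
        · simp only [stepB, if_pos hm, sliceBack_eq w m hm, PySem.Set.mem_add, ih1]
          constructor
          · rintro (⟨i, hi, rfl⟩ | rfl)
            · exact ⟨i, by omega, rfl⟩
            · exact ⟨m - 2, by omega, rfl⟩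
          · rintro ⟨i, hi, rfl⟩
            by_cases hlt : i + 3 ≤ m
            · exact Or.inl ⟨i, hlt, rfl⟩
            · have : i = m - 2 := by omega
              subst this; exact Or.inr rfl
        · simp only [stepB, if_neg hm, ih1]
          constructor
          · rintro ⟨i, hi, rfl⟩; exact ⟨i, by omega, rfl⟩
          · rintro ⟨i, hi, rfl⟩; exact ⟨i, by omega, rfl⟩
      refine ⟨hseen, ?_, ?_⟩
      · have hfst : (stepB w st m).2.1 =
            (if PySem.Set.contains (stepB w st m).1
              (PySem.List.slice w (some (m : Int)) (some ((m : Int) + 2))) then true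
             else st.2.1) := by
          simp [stepB]
        rw [hfst]
        split_ifs with hc
        · simp only [true_iff]
          rw [PySem.Set.contains_iff, hseen, slice2_eq] at hc
          obtain ⟨i, hi, he⟩ := hc
          exact ⟨i, m, by omega, by omega, he.symm⟩
        · rw [ih2]
          constructor
          · rintro ⟨i, j, hij, hjm, he⟩
            exact ⟨i, j, hij, by omega, he⟩
          · rintro ⟨i, j, hij, hjm, he⟩
            by_cases hjm' : j < m
            · exact ⟨i, j, hij, hjm', he⟩
            · have : j = m := by omega
              subst this
              exact absurd (by
                rw [PySem.Set.contains_iff, hseen, slice2_eq]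
                exact ⟨i, by omega, he.symm⟩) hc
      · have hsnd : (stepB w st m).2.2 =
            (if m + 2 < w.length && (w[m]? == w[m+2]?) then true else st.2.2) := by
          simp [stepB]
        rw [hsnd]
        split_ifs with hc
        · simp only [Bool.and_eq_true, decide_eq_true_eq, beq_iff_eq] at hc
          simp only [true_iff]
          exact ⟨m, by omega, hc.1, hc.2⟩
        · rw [ih3]
          simp only [Bool.and_eq_true, decide_eq_true_eq, beq_iff_eq, not_and] at hc
          constructor
          · rintro ⟨j, hjm, hj2, he⟩
            exact ⟨j, by omega, hj2, he⟩
          · rintro ⟨j, hjm, hj2, he⟩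
            by_cases hjm' : j < m
            · exact ⟨j, hjm', hj2, he⟩
            · have : j = m := by omega
              subst this
              exact absurd he (hc hj2)

lemma niceB_iff (w : List Char) : niceB w = true ↔ PairProp w ∧ XProp w := by
  unfold niceB
  simp only [Bool.and_eq_true]
  rw [(foldB_inv w (w.length - 1)).2.1, (foldB_inv w (w.length - 1)).2.2]
  unfold PairProp XProp
  constructor
  · rintro ⟨⟨i, j, hij, hjm, he⟩, ⟨j', hj'm, hj'2, he'⟩⟩
    exact ⟨⟨i, j, hij, by omega, he⟩, ⟨j', hj'2, he'⟩⟩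
  · rintro ⟨⟨i, j, hij, hjm, he⟩, ⟨j', hj'2, he'⟩⟩
    exact ⟨⟨i, j, hij, by omega, he⟩, ⟨j', by omega, hj'2, he'⟩⟩

lemma nice_eq (w : List Char) : (pairLoopA w && twiceLoopA w) = niceB w := by
  rw [Bool.eq_iff_iff, Bool.and_eq_true, pairLoopA_iff, twiceLoopA_iff, niceB_iff]

-- ===== VERDICT =====
theorem part_2_spec : Claim_equal_part_2 := by
  intro words _
  unfold Spec_part_2 part_2 part_2_alt
  simp only [nice_eq]
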